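-- pv_equiv track=rewrite | github.com/mauricioTechDev/daily-code-wars | python/dominant-array-elements.py | solve
-- ===== SOURCE A (Python) =====
-- def solve(arr):
--     ans = list()
--     ans.append(arr[-1])
--     currentVal = arr[-1]
--
--     for el in range(len(arr)-2, -1, -1):
--         if arr[el] > arr[el+1]:
--             if arr[el] > currentVal:
--                 currentVal = arr[el]
--                 ans.insert(0, arr[el])
--     return ans
-- ===== SOURCE B (Python) =====
-- def solve(arr):
--     n = len(arr)
--     suf = [arr[-1]] * n          # IndexError on empty input, like A
--     for i in range(n - 2, -1, -1):
--         suf[i] = arr[i] if arr[i] > suf[i + 1] else suf[i + 1]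
--     out = []
--     for i in range(n):
--         if i == n - 1 or arr[i] > suf[i + 1]:
--             out.append(arr[i])
--     return out
-- ===== Notes on version B (the rewrite author's own statement) =====
-- stated objective: alternative
-- what changed: Replaces A's single backward scan with front-insertion and a running-max variable by a two-pass scheme: first build an explicit suffix-maximum table right-to-left, then a forward pass appends each element strictly greater than the suffix max to its right (the last element always).
import Mathlib
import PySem

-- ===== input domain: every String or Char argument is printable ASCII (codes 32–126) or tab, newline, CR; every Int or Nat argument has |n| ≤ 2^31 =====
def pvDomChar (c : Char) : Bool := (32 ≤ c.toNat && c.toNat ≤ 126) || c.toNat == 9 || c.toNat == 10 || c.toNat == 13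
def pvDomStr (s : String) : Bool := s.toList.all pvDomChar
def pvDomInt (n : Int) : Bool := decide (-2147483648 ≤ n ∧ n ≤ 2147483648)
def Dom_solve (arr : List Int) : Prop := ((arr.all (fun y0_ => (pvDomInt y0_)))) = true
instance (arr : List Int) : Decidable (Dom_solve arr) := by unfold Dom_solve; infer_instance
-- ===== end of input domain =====

-- B builds an explicit suffix-maximum table and then a forward pass, instead of A's
-- single backward scan with a running max and front-insertion (return value only; no mutation observable).

-- ===== PORT A =====
-- one iteration of A's backward loop, at index k (arr[k] vs arr[k+1] and currentVal)
def stepA (arr : List Int) (k : Nat) (s : List Int × Int) : List Int × Int :=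
  let x := PySem.List.pyGetD arr (k : Int) 0
  let y := PySem.List.pyGetD arr ((k : Int) + 1) 0
  if x > y then
    (if x > s.2 then (x :: s.1, x) else s)
  else s

-- `for el in range(len(arr)-2, -1, -1)`: loopA arr n s runs indices n-1, n-2, …, 0
def loopA (arr : List Int) : Nat → (List Int × Int) → (List Int × Int)
  | 0, s => s
  | k + 1, s => loopA arr k (stepA arr k s)

def solve (arr : List Int) : List Int :=
  match PySem.List.pyGet? arr (-1) with
  | none => []        -- Python raises IndexError here; excluded by Pre_solve
  | some last => (loopA arr (arr.length - 1) ([last], last)).1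

-- ===== PORT B =====
-- the suffix-max table: sufTable arr !i = max(arr[i:]), filled right-to-left
def sufTable : List Int → List Int
  | [] => []
  | x :: xs =>
    match sufTable xs with
    | [] => [x]
    | m :: r => (if x > m then x else m) :: m :: r

-- forward pass: keep arr[i] iff i is last or arr[i] > suf[i+1]
def fwdPass : List Int → List Int → List Int
  | [x], _ => [x]
  | x :: xs, _ :: s :: ss => if x > s then x :: fwdPass xs (s :: ss) else fwdPass xs (s :: ss)
  | _, _ => []

def solve_alt (arr : List Int) : List Int := fwdPass arr (sufTable arr)

-- ===== PRECONDITION & SPEC =====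
-- Pre_ excludes only the empty list, on which both A and B raise IndexError (arr[-1]).
def Pre_solve (arr : List Int) : Prop := arr ≠ []
instance (arr : List Int) : Decidable (Pre_solve arr) := by unfold Pre_solve; infer_instance

def pvWitness_solve : List Int := [3, 1, 4, 1, 5]

def Spec_solve (arr : List Int) (out : List Int) : Prop := out = solve_alt arr
instance (arr : List Int) (out : List Int) : Decidable (Spec_solve arr out) := by unfold Spec_solve; infer_instance

-- ===== CLAIM (what is proved, stated in full; the proofs are below) =====
def Claim_equal_solve : Prop := ∀ (arr : List Int), Dom_solve arr → Pre_solve arr → Spec_solve arr (solve arr)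

-- ===== LEMMAS AND PROOFS =====

-- the common specification: keep each element strictly greater than everything to its right
def smax : List Int → Int
  | [] => 0
  | [x] => x
  | x :: y :: t => max x (smax (y :: t))

def dom' : List Int → List Int
  | [] => []
  | [x] => [x]
  | x :: y :: t => if x > smax (y :: t) then x :: dom' (y :: t) else dom' (y :: t)

lemma head_le_smax (y : Int) (t : List Int) : y ≤ smax (y :: t) := by
  cases t with
  | nil => simp [smax]
  | cons a b => simp [smax]

lemma sufTable_cons (x : Int) (xs : List Int) :
    sufTable (x :: xs) = smax (x :: xs) :: sufTable xs := by
  induction xs generalizing x with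
  | nil => simp [sufTable, smax]
  | cons y t ih =>
    rw [sufTable, ih y]
    simp only [smax]
    congr 1
    omega

lemma smax_cons (x y : Int) (t : List Int) :
    smax (x :: y :: t) = max x (smax (y :: t)) := rfl

lemma dom'_cons (x y : Int) (t : List Int) :
    dom' (x :: y :: t) = if x > smax (y :: t) then x :: dom' (y :: t) else dom' (y :: t) := rfl

lemma fwdPass_sufTable (arr : List Int) : fwdPass arr (sufTable arr) = dom' arr := by
  induction arr with
  | nil => rfl
  | cons x xs ih =>
    cases xs with
    | nil => rfl
    | cons y t =>
      have hfwd : fwdPass (x :: y :: t) (sufTable (x :: y :: t))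
          = if x > smax (y :: t) then x :: fwdPass (y :: t) (sufTable (y :: t))
            else fwdPass (y :: t) (sufTable (y :: t)) := by
        rw [sufTable_cons x (y :: t), sufTable_cons y t]
        rfl
      rw [hfwd, ih, dom'_cons]

-- the effect of one backward-loop body on the state, as pure if-arithmetic
lemma step_core (x y e : Int) (dval : List Int) (hyle : y ≤ e) :
    (if x > y then (if x > e then (x :: dval, x) else (dval, e)) else (dval, e))
      = ((if x > e then x :: dval else dval), max x e) := by
  rcases lt_or_ge e x with hgt | hle
  · have hxy : x > y := lt_of_le_of_lt hyle hgt
    rw [if_pos hxy, if_pos hgt, if_pos hgt, max_eq_left hgt.le]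
  · have h2 : ¬ x > e := not_lt.mpr hle
    rw [if_neg h2, if_neg h2, max_eq_right hle, ite_self]

-- A's loop invariant: starting from the state reached for the suffix arr[k:],
-- running indices k-1 … 0 produces the state for the whole list.
lemma loopA_inv (arr : List Int) (k : Nat) (hk : k < arr.length) :
    loopA arr k (dom' (arr.drop k), smax (arr.drop k)) = (dom' arr, smax arr) := by
  induction k with
  | zero => simp [loopA]
  | succ k ih =>
    have hk' : k < arr.length := Nat.lt_of_succ_lt hk
    rw [loopA]
    have hdrop : arr.drop k = arr[k] :: arr.drop (k + 1) := List.drop_eq_getElem_cons hk'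
    have hdrop1 : arr.drop (k + 1) = arr[k + 1] :: arr.drop (k + 2) := List.drop_eq_getElem_cons hk
    have hx : PySem.List.pyGetD arr (k : Int) 0 = arr[k] := by
      rw [PySem.List.pyGetD_natCast]; exact List.getD_eq_getElem arr 0 hk'
    have hy : PySem.List.pyGetD arr ((k : Int) + 1) 0 = arr[k + 1] := by
      have : ((k : Int) + 1) = ((k + 1 : Nat) : Int) := by push_cast; ring
      rw [this, PySem.List.pyGetD_natCast]; exact List.getD_eq_getElem arr 0 hk
    have hstep : stepA arr k (dom' (arr.drop (k + 1)), smax (arr.drop (k + 1)))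
        = (dom' (arr.drop k), smax (arr.drop k)) := by
      rw [hdrop, hdrop1]
      simp only [stepA, hx, hy, dom'_cons, smax_cons]
      exact step_core _ _ _ _ (head_le_smax _ _)
    rw [hstep, ih hk']

lemma solve_eq_dom' (arr : List Int) (h : arr ≠ []) : solve arr = dom' arr := by
  unfold solve
  rw [PySem.List.pyGet?_neg_one, List.getLast?_eq_getLast_of_ne_nil h]
  have hk : arr.length - 1 < arr.length := by
    cases arr with
    | nil => exact absurd rfl h
    | cons a t => simp
  have hinv := loopA_inv arr (arr.length - 1) hk
  rw [List.drop_length_sub_one h] at hinv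
  simp only [dom', smax] at hinv
  change (loopA arr (arr.length - 1) ([arr.getLast h], arr.getLast h)).1 = dom' arr
  rw [hinv]

lemma solve_alt_eq_dom' (arr : List Int) : solve_alt arr = dom' arr :=
  fwdPass_sufTable arr

-- ===== VERDICT (by name: the statement is the Claim_ definition above) =====
theorem solve_spec : Claim_equal_solve := by
  intro arr _ hpre
  unfold Spec_solve
  rw [solve_eq_dom' arr hpre, solve_alt_eq_dom']
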